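-- pv_equiv track=rewrite | github.com/amygee1209/baekjun | 프로그래머스/3/84021. 퍼즐 조각 채우기/퍼즐 조각 채우기.py | getRotatedList
-- ===== SOURCE A (Python) =====
-- def getRotatedList(itemList):
--     R = max(lst[0] for lst in itemList)+1
--     C = max(lst[1] for lst in itemList)+1
--
--     rotate90List = []
--     rotate180List = []
--     rotate270List = []
--     for itemR, itemC in itemList:
--         rotate90List.append((itemC, R-1-itemR))
--         rotate180List.append((R-1-itemR, C-1-itemC))
--         rotate270List.append((C-1-itemC, itemR))
--
--     return [tuple(sorted(itemList)), tuple(sorted(rotate90List)), tuple(sorted(rotate180List)), tuple(sorted(rotate270List))]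
-- ===== SOURCE B (Python) =====
-- def getRotatedList(itemList):
--     R = max(r for r, c in itemList) + 1
--     C = max(c for r, c in itemList) + 1
--     result = [tuple(sorted(itemList))]
--     cur = itemList
--     for dim in (R, C, R):
--         cur = [(c, dim - 1 - r) for r, c in cur]
--         result.append(tuple(sorted(cur)))
--     return result
-- ===== Notes on version B (the rewrite author's own statement) =====
-- stated objective: alternative
-- what changed: B replaces A's three independent closed-form rotation formulas built in one loop by a single rotate-by-90 transform (parameterised by the current height R, C, R) applied three times, appending each sorted snapshot.
import Mathlib
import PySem

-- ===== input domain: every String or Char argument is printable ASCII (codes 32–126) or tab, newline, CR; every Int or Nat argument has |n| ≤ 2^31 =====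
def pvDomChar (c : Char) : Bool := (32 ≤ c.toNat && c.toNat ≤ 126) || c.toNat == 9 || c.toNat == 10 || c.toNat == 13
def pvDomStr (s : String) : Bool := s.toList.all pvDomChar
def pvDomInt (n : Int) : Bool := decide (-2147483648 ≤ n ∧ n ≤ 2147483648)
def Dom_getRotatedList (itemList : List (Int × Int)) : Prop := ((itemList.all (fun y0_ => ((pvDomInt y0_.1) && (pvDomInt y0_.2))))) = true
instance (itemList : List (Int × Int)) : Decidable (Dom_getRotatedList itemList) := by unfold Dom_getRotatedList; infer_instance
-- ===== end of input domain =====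

-- B replaces A's three independent closed-form rotation formulas by one rotation
-- transform applied three times (with the appropriate dimension R, C, R), collecting
-- the sorted snapshots in a fold; objective: alternative decomposition, same cost.

-- ===== PORT A =====
def getRotatedList (itemList : List (Int × Int)) : List (List (Int × Int)) :=
  match PySem.List.max? (itemList.map (fun lst => lst.1)) (fun x => x),
        PySem.List.max? (itemList.map (fun lst => lst.2)) (fun x => x) with
  | some mr, some mc =>
    let R : Int := mr + 1
    let C : Int := mc + 1
    let rot := itemList.foldl
      (fun (acc : List (Int × Int) × List (Int × Int) × List (Int × Int)) it =>
        (acc.1 ++ [(it.2, R - 1 - it.1)],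
         acc.2.1 ++ [(R - 1 - it.1, C - 1 - it.2)],
         acc.2.2 ++ [(C - 1 - it.2, it.1)]))
      ([], [], [])
    [PySem.List.sorted2 itemList Prod.fst Prod.snd,
     PySem.List.sorted2 rot.1 Prod.fst Prod.snd,
     PySem.List.sorted2 rot.2.1 Prod.fst Prod.snd,
     PySem.List.sorted2 rot.2.2 Prod.fst Prod.snd]
  | _, _ => []  -- Python raises ValueError on empty input; excluded by Pre_

-- ===== PORT B =====
def rotateDim (dim : Int) (pts : List (Int × Int)) : List (Int × Int) :=
  pts.map (fun p => (p.2, dim - 1 - p.1))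

def getRotatedList_alt (itemList : List (Int × Int)) : List (List (Int × Int)) :=
  match PySem.List.max? (itemList.map (fun p => p.1)) (fun x => x) with
  | none => []  -- Python raises ValueError on empty input; excluded by Pre_
  | some mr =>
  match PySem.List.max? (itemList.map (fun p => p.2)) (fun x => x) with
  | none => []
  | some mc =>
    let R : Int := mr + 1
    let C : Int := mc + 1
    let st := [R, C, R].foldl
      (fun (acc : List (List (Int × Int)) × List (Int × Int)) dim =>
        let cur := rotateDim dim acc.2
        (acc.1 ++ [PySem.List.sorted2 cur Prod.fst Prod.snd], cur))
      ([PySem.List.sorted2 itemList Prod.fst Prod.snd], itemList)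
    st.1

-- ===== PRECONDITION & SPEC =====
-- Pre_ excludes only the empty list, on which Python A raises ValueError (max of empty sequence).
def Pre_getRotatedList (itemList : List (Int × Int)) : Prop := itemList ≠ []
instance (itemList : List (Int × Int)) : Decidable (Pre_getRotatedList itemList) := by
  unfold Pre_getRotatedList; infer_instance

def pvWitness_getRotatedList : (List (Int × Int)) := [(0, 0), (0, 1), (1, 1)]

def Spec_getRotatedList (itemList : List (Int × Int)) (out : List (List (Int × Int))) : Prop := out = getRotatedList_alt itemList
instance (itemList : List (Int × Int)) (out : List (List (Int × Int))) : Decidable (Spec_getRotatedList itemList out) := by unfold Spec_getRotatedList; infer_instance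

-- ===== CLAIM (what is proved, stated in full; the proofs are below) =====
def Claim_equal_getRotatedList : Prop := ∀ (itemList : List (Int × Int)), Dom_getRotatedList itemList → Pre_getRotatedList itemList → Spec_getRotatedList itemList (getRotatedList itemList)

-- ===== LEMMAS AND PROOFS =====
lemma foldl_three_append (f g h : (Int × Int) → (Int × Int)) :
    ∀ (xs : List (Int × Int)) (a b c : List (Int × Int)),
      xs.foldl
        (fun (acc : List (Int × Int) × List (Int × Int) × List (Int × Int)) it =>
          (acc.1 ++ [f it], acc.2.1 ++ [g it], acc.2.2 ++ [h it])) (a, b, c)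
      = (a ++ xs.map f, b ++ xs.map g, c ++ xs.map h) := by
  intro xs
  induction xs with
  | nil => simp
  | cons x t ih => intro a b c; simp [List.foldl, ih]

-- ===== VERDICT (by name: the statement is the Claim_ definition above) =====
theorem getRotatedList_spec : Claim_equal_getRotatedList := by
  intro xs _ hpre
  unfold Spec_getRotatedList getRotatedList getRotatedList_alt
  have h1 : xs.map (fun p => p.1) ≠ [] := by simpa using hpre
  have h2 : xs.map (fun p => p.2) ≠ [] := by simpa using hpre
  obtain ⟨mr, hmr⟩ := Option.ne_none_iff_exists'.mp
    (fun h => h1 ((PySem.List.max?_eq_none_iff (xs.map (fun p => p.1)) (fun x : Int => x)).mp h))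
  obtain ⟨mc, hmc⟩ := Option.ne_none_iff_exists'.mp
    (fun h => h2 ((PySem.List.max?_eq_none_iff (xs.map (fun p => p.2)) (fun x : Int => x)).mp h))
  rw [hmr, hmc]
  simp only [foldl_three_append, List.foldl, rotateDim, List.map_map, List.nil_append]
  refine List.cons_eq_cons.mpr ⟨rfl, List.cons_eq_cons.mpr ⟨?_, List.cons_eq_cons.mpr ⟨?_, List.cons_eq_cons.mpr ⟨?_, rfl⟩⟩⟩⟩
  all_goals
    first
      | rfl
      | (congr 1
         apply List.map_congr_left
         intro p _
         refine Prod.ext ?_ ?_ <;> simp)
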